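-- pv_equiv track=rewrite | github.com/TedCassirer/advent-of-code | aoc_cas/aoc2023/day11.py | calculate_expanded_distance
-- ===== SOURCE A (Python) =====
-- Coordinate = tuple[int, int]
--
-- def calculate_expanded_distance(coords: list[Coordinate]) -> int:
--     distance = 0
--     seen_galaxies = 0
--     remaining_galaxies = len(coords)
--     by_y = sorted(c[0] for c in coords)
--     prev = 0
--     for y in by_y:
--         if y - 1 > prev:
--             distance += (y - 1 - prev) * (seen_galaxies * remaining_galaxies)
--         seen_galaxies += 1
--         remaining_galaxies -= 1
--         prev = y
--
--     seen_galaxies = 0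
--     remaining_galaxies = len(coords)
--     by_x = sorted(c[1] for c in coords)
--     prev = 0
--     for x in by_x:
--         if x - 1 > prev:
--             distance += (x - 1 - prev) * (seen_galaxies * remaining_galaxies)
--         seen_galaxies += 1
--         remaining_galaxies -= 1
--         prev = x
--
--     return distance
-- ===== SOURCE B (Python) =====
-- def calculate_expanded_distance(coords):
--     total = 0
--     for vals in (sorted(c[0] for c in coords), sorted(c[1] for c in coords)):
--         n = len(vals)
--         pair_sum = sum(v * (2 * i - n + 1) for i, v in enumerate(vals))
--         crossings = sum(i * (n - i)
--                         for i, (a, b) in enumerate(zip(vals, vals[1:]), 1)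
--                         if a != b)
--         total += pair_sum - crossings
--     return total
-- ===== Notes on version B (the rewrite author's own statement) =====
-- stated objective: alternative
-- what changed: Replaces A's per-axis running-state loop (prev/seen/remaining with a gap>=2 conditional) by a closed-form pairwise-distance sum (sum of v*(2i-n+1) over the sorted values) minus a crossings correction i*(n-i) at each adjacent pair of distinct values.
import Mathlib
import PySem

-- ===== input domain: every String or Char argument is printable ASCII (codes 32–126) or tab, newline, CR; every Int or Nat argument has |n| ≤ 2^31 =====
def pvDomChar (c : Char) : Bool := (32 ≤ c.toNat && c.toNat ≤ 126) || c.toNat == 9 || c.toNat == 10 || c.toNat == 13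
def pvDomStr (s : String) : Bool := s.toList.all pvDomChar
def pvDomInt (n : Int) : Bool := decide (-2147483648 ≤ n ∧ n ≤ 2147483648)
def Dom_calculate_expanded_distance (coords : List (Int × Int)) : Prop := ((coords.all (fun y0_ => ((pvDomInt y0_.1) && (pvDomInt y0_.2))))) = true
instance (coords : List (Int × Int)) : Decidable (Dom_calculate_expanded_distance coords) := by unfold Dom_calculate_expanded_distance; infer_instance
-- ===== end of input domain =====

-- B replaces A's gap/prev/seen/remaining loop by a closed-form pairwise-distance sum
-- minus a crossings correction over adjacent distinct values (objective: alternative).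

-- ===== PORT A =====
-- A's per-axis for-loop: state (distance, seen_galaxies, remaining_galaxies, prev)
def pvLoopA : List Int → Int → Int → Int → Int → Int
  | [], d, _, _, _ => d
  | v :: vs, d, s, r, p =>
      pvLoopA vs (if v - 1 > p then d + (v - 1 - p) * (s * r) else d) (s + 1) (r - 1) v

def calculate_expanded_distance (coords : List (Int × Int)) : Int :=
  let n : Int := coords.length
  let by_y := PySem.List.sorted (coords.map (fun c => c.1)) (fun x => x) false
  let d1 := pvLoopA by_y 0 0 n 0
  let by_x := PySem.List.sorted (coords.map (fun c => c.2)) (fun x => x) false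
  pvLoopA by_x d1 0 n 0

-- ===== PORT B =====
-- sum(v * (2*i - n + 1) for i, v in enumerate(vals)) — the generator as a recursion with counter i
def pvPairAux (n : Int) : List Int → Int → Int
  | [], _ => 0
  | v :: vs, i => v * (2 * i - n + 1) + pvPairAux n vs (i + 1)

-- sum(i*(n-i) for i,(a,b) in enumerate(zip(vals, vals[1:]), 1) if a != b) — zip of adjacent
-- pairs as a recursion over the list (exact: zip(vals, vals[1:]) pairs adjacent elements)
def pvCrossAux (n : Int) : List Int → Int → Int
  | a :: b :: rest, i => (if a ≠ b then i * (n - i) else 0) + pvCrossAux n (b :: rest) (i + 1)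
  | _, _ => 0

def pvAxisB (vals : List Int) : Int :=
  let n : Int := vals.length
  pvPairAux n vals 0 - pvCrossAux n vals 1

def calculate_expanded_distance_alt (coords : List (Int × Int)) : Int :=
  pvAxisB (PySem.List.sorted (coords.map (fun c => c.1)) (fun x => x) false)
  + pvAxisB (PySem.List.sorted (coords.map (fun c => c.2)) (fun x => x) false)

-- ===== PRECONDITION & SPEC =====
def Spec_calculate_expanded_distance (coords : List (Int × Int)) (out : Int) : Prop := out = calculate_expanded_distance_alt coords
instance (coords : List (Int × Int)) (out : Int) : Decidable (Spec_calculate_expanded_distance coords out) := by unfold Spec_calculate_expanded_distance; infer_instance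

-- ===== CLAIM (what is proved, stated in full; the proofs are below) =====
def Claim_equal_calculate_expanded_distance : Prop := ∀ (coords : List (Int × Int)), Dom_calculate_expanded_distance coords → Spec_calculate_expanded_distance coords (calculate_expanded_distance coords)

-- ===== LEMMAS AND PROOFS =====

theorem pvLoopA_acc (vs : List Int) : ∀ (d s r p : Int),
    pvLoopA vs d s r p = d + pvLoopA vs 0 s r p := by
  induction vs with
  | nil => intro d s r p; simp [pvLoopA]
  | cons v vs ih =>
      intro d s r p
      simp only [pvLoopA]
      rw [ih (if v - 1 > p then d + (v - 1 - p) * (s * r) else d),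
          ih (if v - 1 > p then 0 + (v - 1 - p) * (s * r) else 0)]
      split_ifs <;> ring

-- the loop invariant: A's remaining tail, started after element p at position s,
-- equals B's tail sums plus boundary terms (last element tracked by a fold)
theorem pvLoopA_main (n : Int) (vs : List Int) : ∀ (p s : Int),
    List.Pairwise (· ≤ ·) (p :: vs) →
    pvLoopA vs 0 s (n - s) p
      = pvPairAux n vs s - pvCrossAux n (p :: vs) s
        - p * (s * (n - s))
        + (vs.foldl (fun _ v => v) p) * ((s + vs.length) * (n - s - vs.length)) := by
  induction vs with
  | nil => intro p s _; simp [pvLoopA, pvPairAux, pvCrossAux]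
  | cons v vs ih =>
      intro p s hch
      rw [List.pairwise_cons] at hch
      obtain ⟨hple, htail⟩ := hch
      have hpv : p ≤ v := hple v (by simp)
      simp only [pvLoopA]
      rw [pvLoopA_acc]
      have hr : n - s - 1 = n - (s + 1) := by ring
      rw [hr, ih v (s + 1) htail]
      simp only [pvPairAux, pvCrossAux, List.foldl_cons, List.length_cons]
      push_cast
      by_cases hpe : p = v
      · rw [if_neg (show ¬ (v - 1 > p) by omega), if_neg (show ¬ (p ≠ v) by simp [hpe])]
        rw [hpe]; ring
      · rw [if_pos (hpe : p ≠ v)]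
        by_cases h1 : v - 1 > p
        · rw [if_pos h1]; ring
        · have hv : v = p + 1 := by omega
          rw [if_neg h1]; subst hv; ring

-- one axis: A's loop on the sorted values equals B's pairwise sum minus crossings
theorem axis_eq (vs : List Int) (h : List.Pairwise (· ≤ ·) vs) :
    pvLoopA vs 0 0 (vs.length : Int) 0 = pvAxisB vs := by
  cases vs with
  | nil => simp [pvLoopA, pvAxisB, pvPairAux, pvCrossAux]
  | cons v rest =>
      simp only [pvLoopA]
      rw [pvLoopA_acc]
      rw [show ((v :: rest).length : Int) - 1 = ((v :: rest).length : Int) - (0 + 1) from by ring]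
      rw [pvLoopA_main ((v :: rest).length : Int) rest v (0 + 1) h]
      simp only [pvAxisB, pvPairAux, List.length_cons]
      push_cast
      norm_num
      ring

theorem axis_full (xs : List Int) :
    pvLoopA (PySem.List.sorted xs (fun x => x) false) 0 0 (xs.length : Int) 0
      = pvAxisB (PySem.List.sorted xs (fun x => x) false) := by
  rw [show (xs.length : Int) = ((PySem.List.sorted xs (fun x => x) false).length : Int) from by
    rw [PySem.List.length_sorted]]
  exact axis_eq _ (PySem.List.sorted_pairwise xs (fun x => x))

-- ===== VERDICT (by name: the statement is the Claim_ definition above) =====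
theorem calculate_expanded_distance_spec : Claim_equal_calculate_expanded_distance := by
  intro coords _
  unfold Spec_calculate_expanded_distance calculate_expanded_distance calculate_expanded_distance_alt
  simp only []
  rw [pvLoopA_acc]
  have h1 := axis_full (coords.map (fun c => c.1))
  have h2 := axis_full (coords.map (fun c => c.2))
  rw [List.length_map] at h1 h2
  rw [h1, h2]
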